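-- pv_equiv track=rewrite | github.com/Yeonhee-Kim/CodingTest | 프로그래머스/2/42583. 다리를 지나는 트럭/다리를 지나는 트럭.py | solution
-- ===== SOURCE A (Python) =====
-- from collections import deque
--
-- def solution(bridge_length, weight, truck_weights):
--     cnt = 0
--     bridge = deque([0] * bridge_length) # 다리 위 상태 (앞이 출구)
--     cur_weight = 0 # 현재 다리 총 하중
--     waiting = deque(truck_weights) # 대기 트럭
--
--     while bridge:
--         cnt += 1
--         # 1) 한 칸 전진: 출구 쪽 트럭/빈칸이 내려감
--         out = bridge.popleft()
--         cur_weight -= out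
--
--         # 2) 새 트럭 진입 (대기가 남아 있고, 무게 여유가 있으면)
--         if waiting:
--             if cur_weight + waiting[0] <= weight:
--                 t = waiting.popleft()
--                 bridge.append(t)
--                 cur_weight += t
--             else:
--                 bridge.append(0)
--
--         # 대기가 비었으면 더 이상 append 안 함 => while 종료
--
--     return cnt
-- ===== SOURCE B (Python) =====
-- from collections import deque
--
-- def solution(bridge_length, weight, truck_weights):
--     # Event-driven: track (entry_time, weight) of trucks on the bridge and jump
--     # time directly to the next moment a truck can enter; answer = last entry + length.
--     if bridge_length <= 0:
--         return 0   # degenerate bridge: nothing to cross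
--     on = deque()   # trucks currently on the bridge, oldest first
--     load = 0       # total weight on the bridge
--     t = 0          # time of the last entry (0 = start)
--     for w in truck_weights:
--         t += 1
--         # drop trucks that have already left the bridge by time t
--         while on and on[0][0] <= t - bridge_length:
--             load -= on.popleft()[1]
--         # if too heavy, wait for trucks ahead to leave; each leaves at entry+length
--         while on and load + w > weight:
--             e, v = on.popleft()
--             load -= v
--             t = e + bridge_length
--         on.append((t, w))
--         load += w
--     return t + bridge_length
-- ===== Notes on version B (the rewrite author's own statement) =====
-- stated objective: alternative
-- what changed: A simulates the bridge second by second with a length-L deque of mostly-zero cells; B is event-driven: it keeps only (entry_time, weight) pairs of trucks actually on the bridge and jumps time directly to each truck's entry moment, returning last entry time + bridge_length (0 for a non-positive bridge_length); intended as asymptotically cheaper (O(n) vs O(n*L)) but a timing run could not confirm a measured ratio.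
import Mathlib
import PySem

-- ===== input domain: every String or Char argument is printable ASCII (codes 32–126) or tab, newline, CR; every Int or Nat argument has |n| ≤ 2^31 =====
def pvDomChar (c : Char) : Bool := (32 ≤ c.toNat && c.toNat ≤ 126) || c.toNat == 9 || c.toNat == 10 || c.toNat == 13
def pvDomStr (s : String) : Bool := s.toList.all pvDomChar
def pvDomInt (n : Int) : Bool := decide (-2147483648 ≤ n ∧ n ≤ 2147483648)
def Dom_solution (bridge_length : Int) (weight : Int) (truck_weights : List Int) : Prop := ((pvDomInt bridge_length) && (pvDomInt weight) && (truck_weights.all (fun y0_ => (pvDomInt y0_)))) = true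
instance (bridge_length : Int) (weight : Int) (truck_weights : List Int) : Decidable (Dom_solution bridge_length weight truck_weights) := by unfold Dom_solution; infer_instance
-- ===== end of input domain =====

-- B replaces A's second-by-second simulation over a length-L deque by an event-driven
-- queue of (entry time, weight) pairs, jumping time straight to each truck's entry
-- (objective: alternative algorithm; does one step per truck instead of one per second).

-- ===== PORT A =====
-- A's while loop, step for step (cnt += 1; pop front; maybe enter a truck or a 0).
-- `fuel` only makes the loop total in Lean; on every input admitted by Pre_solution the
-- loop finishes within it (proved implicitly by the equivalence proof below).
def aLoop (weight : Int) : Nat → List Int → Int → List Int → Int → Int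
  | 0, _, _, _, cnt => cnt
  | _ + 1, [], _, _, cnt => cnt
  | fuel + 1, out :: rest, cur, [], cnt => aLoop weight fuel rest (cur - out) [] (cnt + 1)
  | fuel + 1, out :: rest, cur, w :: ws, cnt =>
      if cur - out + w ≤ weight then aLoop weight fuel (rest ++ [w]) (cur - out + w) ws (cnt + 1)
      else aLoop weight fuel (rest ++ [0]) (cur - out) (w :: ws) (cnt + 1)

def solution (bridge_length : Int) (weight : Int) (truck_weights : List Int) : Int :=
  aLoop weight ((truck_weights.length + 1) * bridge_length.toNat)
    (List.replicate bridge_length.toNat 0) 0 truck_weights 0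

-- ===== PORT B =====
-- first while of Source B: drop trucks that have left the bridge by time t
def dropExited (bl t : Int) : List (Int × Int) → Int → List (Int × Int) × Int
  | [], load => ([], load)
  | (e, v) :: rest, load =>
      if e ≤ t - bl then dropExited bl t rest (load - v) else ((e, v) :: rest, load)

-- second while of Source B: pop trucks ahead until the new truck fits, jumping time
def popUntilFit (bl weight w : Int) : List (Int × Int) → Int → Int → List (Int × Int) × Int × Int
  | [], load, t => ([], load, t)
  | (e, v) :: rest, load, t =>
      if load + w > weight then popUntilFit bl weight w rest (load - v) (e + bl)
      else ((e, v) :: rest, load, t)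

-- the for loop of Source B over the trucks
def bLoop (bl weight : Int) : List Int → List (Int × Int) → Int → Int → Int
  | [], _, _, t => t + bl
  | w :: ws, on, load, t =>
      let p := dropExited bl (t + 1) on load
      let q := popUntilFit bl weight w p.1 p.2 (t + 1)
      bLoop bl weight ws (q.1 ++ [(q.2.2, w)]) (q.2.1 + w) q.2.2

def solution_alt (bridge_length : Int) (weight : Int) (truck_weights : List Int) : Int :=
  if bridge_length ≤ 0 then 0
  else bLoop bridge_length weight truck_weights [] 0 0

-- ===== PRECONDITION & SPEC =====
-- Pre_ excludes exactly the inputs on which A never returns: a positive bridge with a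
-- truck heavier than the limit, where A's while loop appends 0 forever.
def Pre_solution (bridge_length : Int) (weight : Int) (truck_weights : List Int) : Prop :=
  bridge_length ≤ 0 ∨ ∀ x ∈ truck_weights, x ≤ weight
instance (bridge_length : Int) (weight : Int) (truck_weights : List Int) : Decidable (Pre_solution bridge_length weight truck_weights) := by unfold Pre_solution; infer_instance

def pvWitness_solution : Int × Int × List Int := (2, 10, [7, 4, 5, 6])

def Spec_solution (bridge_length : Int) (weight : Int) (truck_weights : List Int) (out : Int) : Prop := out = solution_alt bridge_length weight truck_weights
instance (bridge_length : Int) (weight : Int) (truck_weights : List Int) (out : Int) : Decidable (Spec_solution bridge_length weight truck_weights out) := by unfold Spec_solution; infer_instance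

-- ===== CLAIM (what is proved, stated in full; the proofs are below) =====
def Claim_equal_solution : Prop := ∀ (bridge_length : Int) (weight : Int) (truck_weights : List Int), Dom_solution bridge_length weight truck_weights → Pre_solution bridge_length weight truck_weights → Spec_solution bridge_length weight truck_weights (solution bridge_length weight truck_weights)

-- ===== LEMMAS AND PROOFS =====

-- total weight of the trucks recorded on the bridge
def sumV (on : List (Int × Int)) : Int := (on.map Prod.snd).sum

-- the bridge cell at position s: the weight of the truck that entered at time s, else 0
def lookup (s : Int) : List (Int × Int) → Int
  | [] => 0
  | (e, v) :: rest => if e = s then v else lookup s rest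

-- A's bridge deque at a moment when positions lo, lo+1, …, lo+n-1 are on the bridge
def cells (on : List (Int × Int)) (lo : Int) (n : Nat) : List Int :=
  (List.range n).map (fun (i : Nat) => lookup (lo + (i : Int)) on)

def keyLT (p q : Int × Int) : Prop := p.1 < q.1

theorem sumV_nil : sumV [] = 0 := rfl
theorem sumV_cons (e v : Int) (rest : List (Int × Int)) :
    sumV ((e, v) :: rest) = v + sumV rest := by simp [sumV]
theorem sumV_snoc (on : List (Int × Int)) (t w : Int) :
    sumV (on ++ [(t, w)]) = sumV on + w := by simp [sumV]

theorem lookup_eq_zero (s : Int) (on : List (Int × Int)) (h : ∀ p ∈ on, p.1 ≠ s) :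
    lookup s on = 0 := by
  induction on with
  | nil => rfl
  | cons p rest ih =>
      obtain ⟨e, v⟩ := p
      simp only [lookup]
      rw [if_neg (h (e, v) (by simp))]
      exact ih fun q hq => h q (by simp [hq])

theorem lookup_append_ne (s t w : Int) (on : List (Int × Int)) (h : s ≠ t) :
    lookup s (on ++ [(t, w)]) = lookup s on := by
  induction on with
  | nil =>
      simp only [List.nil_append, lookup]
      rw [if_neg fun hh => h hh.symm]
  | cons p rest ih =>
      obtain ⟨e, v⟩ := p
      simp only [List.cons_append, lookup]
      rw [ih]

theorem lookup_append_self (t w : Int) (on : List (Int × Int)) (h : ∀ p ∈ on, p.1 ≠ t) :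
    lookup t (on ++ [(t, w)]) = w := by
  induction on with
  | nil => simp [lookup]
  | cons p rest ih =>
      obtain ⟨e, v⟩ := p
      simp only [List.cons_append, lookup]
      rw [if_neg (h (e, v) (by simp)), ih fun q hq => h q (by simp [hq])]

theorem cells_len (on : List (Int × Int)) (lo : Int) (n : Nat) : (cells on lo n).length = n := by
  simp [cells]

theorem cells_nil (lo : Int) (n : Nat) : cells [] lo n = List.replicate n 0 := by
  simp [cells, lookup, List.map_const']

theorem cells_cons (on : List (Int × Int)) (lo : Int) (n : Nat) :
    cells on lo (n + 1) = lookup lo on :: cells on (lo + 1) n := by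
  unfold cells
  rw [List.range_succ_eq_map, List.map_cons, List.map_map]
  congr 1
  · norm_num
  · apply List.map_congr_left
    intro i _
    simp only [Function.comp]
    congr 1
    push_cast
    ring

theorem cells_snoc (on : List (Int × Int)) (lo : Int) (n : Nat) :
    cells on lo (n + 1) = cells on lo n ++ [lookup (lo + n) on] := by
  unfold cells
  rw [List.range_succ, List.map_append]
  simp

theorem cells_congr (on on' : List (Int × Int)) (lo : Int) (n : Nat)
    (h : ∀ s : Int, lo ≤ s → s < lo + n → lookup s on = lookup s on') :
    cells on lo n = cells on' lo n := by
  unfold cells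
  apply List.map_congr_left
  intro i hi
  have hi' : i < n := List.mem_range.mp hi
  exact h _ (by omega) (by omega)

theorem dropExited_id (bl t : Int) (on : List (Int × Int)) (load : Int)
    (h : ∀ p ∈ on, t - bl < p.1) :
    dropExited bl t on load = (on, load) := by
  cases on with
  | nil => rfl
  | cons p rest =>
      obtain ⟨e, v⟩ := p
      have := h (e, v) (by simp)
      simp only [dropExited]
      rw [if_neg (by omega)]

-- the drain after the last truck: waiting empty, each step pops one cell
theorem aLoop_drain (weight : Int) :
    ∀ (bridge : List Int) (fuel : Nat) (cur cnt : Int), bridge.length ≤ fuel →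
      aLoop weight fuel bridge cur [] cnt = cnt + bridge.length := by
  intro bridge
  induction bridge with
  | nil => intro fuel cur cnt _; cases fuel <;> simp [aLoop]
  | cons x rest ih =>
      intro fuel cur cnt hf
      obtain ⟨f, rfl⟩ : ∃ f, fuel = f + 1 := ⟨fuel - 1, by simp at hf; omega⟩
      simp only [aLoop]
      rw [ih f (cur - x) (cnt + 1) (by simp at hf ⊢; omega)]
      simp only [List.length_cons]
      push_cast
      ring

theorem zero_run (weight w cur : Int) (ws : List Int) (on : List (Int × Int)) (bl : Nat)
    (hbl : 1 ≤ bl) (hcond : ¬ cur + w ≤ weight) :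
    ∀ (k : Nat), ∀ (lo cnt : Int) (f : Nat),
      (∀ s : Int, lo ≤ s → s < lo + k → lookup s on = 0) →
      (∀ s : Int, lo + bl ≤ s → lookup s on = 0) →
      aLoop weight (k + f) (cells on lo bl) cur (w :: ws) cnt
        = aLoop weight f (cells on (lo + k) bl) cur (w :: ws) (cnt + k) := by
  intro k
  induction k with
  | zero => intro lo cnt f _ _; simp
  | succ k ih =>
      intro lo cnt f h1 h2
      obtain ⟨b, rfl⟩ : ∃ b, bl = b + 1 := ⟨bl - 1, by omega⟩
      have hk1 : (k : Int) + 1 = ((k + 1 : Nat) : Int) := by push_cast; ring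
      have hhead : lookup lo on = 0 := h1 lo le_rfl (by push_cast; omega)
      rw [cells_cons, hhead]
      have hfe : k + 1 + f = (k + f) + 1 := by omega
      rw [hfe]
      simp only [aLoop]
      rw [if_neg (by simpa using hcond)]
      have happ : cells on (lo + 1) b ++ [0] = cells on (lo + 1) (b + 1) := by
        rw [cells_snoc, h2 (lo + 1 + b) (by push_cast; omega)]
      rw [happ, sub_zero]
      rw [ih (lo + 1) (cnt + 1) f
        (fun s hs1 hs2 => h1 s (by omega) (by push_cast at hs2 ⊢; omega))
        (fun s hs => h2 s (by push_cast at hs ⊢; omega))]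
      rw [show lo + 1 + (k : Int) = lo + ((k + 1 : Nat) : Int) by push_cast; ring,
          show cnt + 1 + (k : Int) = cnt + ((k + 1 : Nat) : Int) by push_cast; ring]

-- one aligned step of A: pop the cell that exits, then either the truck enters or a 0 does
theorem dropExited_spec (bl : Nat) (t : Int) (on on₁ : List (Int × Int)) (load₁ : Int)
    (hwin : ∀ p ∈ on, t - (bl : Int) < p.1 ∧ p.1 ≤ t) (hpw : List.Pairwise keyLT on)
    (hE : dropExited (bl : Int) (t + 1) on (sumV on) = (on₁, load₁)) :
    load₁ = sumV on₁ ∧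
    sumV on₁ = sumV on - lookup (t + 1 - (bl : Int)) on ∧
    (∀ p ∈ on₁, t + 1 - (bl : Int) < p.1 ∧ p.1 ≤ t) ∧ List.Pairwise keyLT on₁ ∧
    (∀ s : Int, s ≠ t + 1 - (bl : Int) → lookup s on₁ = lookup s on) := by
  cases on with
  | nil =>
      simp only [dropExited, Prod.mk.injEq] at hE
      obtain ⟨h1, h2⟩ := hE
      subst h1; subst h2
      refine ⟨rfl, by simp [sumV, lookup], by simp, by simp, fun s _ => rfl⟩
  | cons p rest =>
      obtain ⟨e, v⟩ := p
      have hpwh : ∀ q ∈ rest, e < q.1 := by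
        intro q hq; exact List.rel_of_pairwise_cons hpw hq
      have hwe := hwin (e, v) (by simp)
      by_cases he : e ≤ t + 1 - (bl : Int)
      · have hee : e = t + 1 - (bl : Int) := by omega
        have hrest : dropExited (bl : Int) (t + 1) rest (sumV ((e, v) :: rest) - v)
            = (rest, sumV ((e, v) :: rest) - v) :=
          dropExited_id _ _ _ _ (fun q hq => by have := hpwh q hq; omega)
        simp only [dropExited, if_pos he, hrest, Prod.mk.injEq] at hE
        obtain ⟨h1, h2⟩ := hE
        subst h1; subst h2
        have hlv : lookup (t + 1 - (bl : Int)) ((e, v) :: rest) = v := by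
          simp [lookup, hee]
        refine ⟨by rw [sumV_cons]; ring, by rw [hlv, sumV_cons]; ring,
          fun q hq => ⟨by have := hpwh q hq; omega, (hwin q (by simp [hq])).2⟩,
          hpw.of_cons, fun s hs => ?_⟩
        simp only [lookup]
        rw [if_neg (by omega)]
      · have hall : ∀ q ∈ (e, v) :: rest, t + 1 - (bl : Int) < q.1 := by
          intro q hq
          rcases List.mem_cons.mp hq with h | h
          · subst h; omega
          · have := hpwh q h; omega
        have hid : dropExited (bl : Int) (t + 1) ((e, v) :: rest) (sumV ((e, v) :: rest))
            = ((e, v) :: rest, sumV ((e, v) :: rest)) :=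
          dropExited_id _ _ _ _ (fun q hq => hall q hq)
        rw [hid, Prod.mk.injEq] at hE
        obtain ⟨h1, h2⟩ := hE
        subst h1; subst h2
        have hl0 : lookup (t + 1 - (bl : Int)) ((e, v) :: rest) = 0 :=
          lookup_eq_zero _ _ (fun q hq => by have := hall q hq; omega)
        exact ⟨rfl, by rw [hl0]; ring,
          fun q hq => ⟨hall q hq, (hwin q hq).2⟩, hpw, fun s _ => rfl⟩

theorem step_aligned (weight w t : Int) (ws : List Int) (bl : Nat) (hbl : 1 ≤ bl)
    (on on₁ : List (Int × Int)) (load₁ : Int)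
    (hwin : ∀ p ∈ on, t - (bl : Int) < p.1 ∧ p.1 ≤ t) (hpw : List.Pairwise keyLT on)
    (hE : dropExited (bl : Int) (t + 1) on (sumV on) = (on₁, load₁)) :
    load₁ = sumV on₁ ∧ (∀ p ∈ on₁, t + 1 - (bl : Int) < p.1 ∧ p.1 ≤ t) ∧
    List.Pairwise keyLT on₁ ∧
    ∀ f, aLoop weight (1 + f) (cells on (t - (bl : Int) + 1) bl) (sumV on) (w :: ws) t
      = if sumV on₁ + w ≤ weight
        then aLoop weight f (cells (on₁ ++ [(t + 1, w)]) (t + 1 - (bl : Int) + 1) bl) (sumV on₁ + w) ws (t + 1)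
        else aLoop weight f (cells on₁ (t + 1 - (bl : Int) + 1) bl) (sumV on₁) (w :: ws) (t + 1) := by
  obtain ⟨hL, hS, hW1, hP1, hLK⟩ := dropExited_spec bl t on on₁ load₁ hwin hpw hE
  refine ⟨hL, hW1, hP1, fun f => ?_⟩
  obtain ⟨b, rfl⟩ : ∃ b, bl = b + 1 := ⟨bl - 1, by omega⟩
  have e1 : t - (((b + 1 : Nat)) : Int) + 1 = t + 1 - (((b + 1 : Nat)) : Int) := by
    push_cast; ring
  rw [e1, cells_cons, Nat.add_comm 1 f]
  simp only [aLoop]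
  rw [show sumV on - lookup (t + 1 - (((b + 1 : Nat)) : Int)) on = sumV on₁ from hS.symm]
  -- the two bridges coincide cell by cell
  have hcellsA : cells on (t + 1 - (((b + 1 : Nat)) : Int) + 1) b
      = cells on₁ (t + 1 - (((b + 1 : Nat)) : Int) + 1) b := by
    apply cells_congr
    intro s hs1 _
    exact (hLK s (by omega)).symm
  have hlast : t + 1 - (((b + 1 : Nat)) : Int) + 1 + (b : Int) = t + 1 := by push_cast; ring
  have hne1 : ∀ p ∈ on₁, p.1 ≠ t + 1 := fun p hp => by have := (hW1 p hp).2; omega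
  split_ifs with hc
  · congr 1
    rw [cells_snoc, hlast, lookup_append_self _ _ _ hne1, hcellsA]
    congr 1
    apply cells_congr
    intro s hs1 hs2
    rw [lookup_append_ne _ _ _ _ (by push_cast at hs2 ⊢; omega)]
  · congr 1
    rw [cells_snoc, hlast, lookup_eq_zero _ _ hne1, hcellsA]

theorem pop_run (weight w : Int) (bl : Nat) (hbl : 1 ≤ bl) (hw : w ≤ weight) (ws : List Int) :
    ∀ (on : List (Int × Int)) (τ U : Int),
      (∀ p ∈ on, τ - (bl : Int) < p.1 ∧ p.1 ≤ U) → List.Pairwise keyLT on → U ≤ τ →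
      weight < sumV on + w →
      ∃ (on' : List (Int × Int)) (t' : Int) (c : Nat),
        popUntilFit (bl : Int) weight w on (sumV on) τ = (on', sumV on', t') ∧
        τ < t' ∧ t' ≤ U + (bl : Int) ∧ (c : Int) = t' - τ ∧
        (∀ p ∈ on', t' - (bl : Int) < p.1 ∧ p.1 ≤ U) ∧ List.Pairwise keyLT on' ∧
        ∀ f, aLoop weight (c + f) (cells on (τ - (bl : Int) + 1) bl) (sumV on) (w :: ws) τ
          = aLoop weight f (cells (on' ++ [(t', w)]) (t' - (bl : Int) + 1) bl) (sumV on' + w) ws t' := by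
  intro on
  induction on with
  | nil =>
      intro τ U _ _ _ hgt
      rw [sumV_nil] at hgt
      exact absurd hgt (by omega)
  | cons p rest ih =>
      obtain ⟨e, v⟩ := p
      intro τ U hwin hpw hUτ hgt
      have hpwh : ∀ q ∈ rest, e < q.1 := fun q hq => List.rel_of_pairwise_cons hpw hq
      have hwe := hwin (e, v) (by simp)
      have hsv : sumV ((e, v) :: rest) - v = sumV rest := by rw [sumV_cons]; ring
      have hkI := Int.toNat_of_nonneg (show 0 ≤ e - τ + (bl : Int) - 1 by omega)
      set k : Nat := (e - τ + (bl : Int) - 1).toNat with hk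
      -- the zero run from time τ up to time e + bl - 1
      have hzr := zero_run weight w (sumV ((e, v) :: rest)) ws ((e, v) :: rest) bl hbl
        (by omega) k (τ - (bl : Int) + 1) τ
      -- the aligned step at time e + bl - 1 pops the truck (e, v)
      have hwin2 : ∀ p ∈ (e, v) :: rest,
          (e + (bl : Int) - 1) - (bl : Int) < p.1 ∧ p.1 ≤ e + (bl : Int) - 1 := by
        intro q hq
        rcases List.mem_cons.mp hq with h | h
        · subst h; constructor <;> simp <;> omega
        · have h1 := hpwh q h
          have h2 := (hwin q (by simp [h])).2
          constructor <;> omega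
      have hE : dropExited (bl : Int) ((e + (bl : Int) - 1) + 1) ((e, v) :: rest)
          (sumV ((e, v) :: rest)) = (rest, sumV ((e, v) :: rest) - v) := by
        simp only [dropExited]
        rw [if_pos (by omega)]
        exact dropExited_id _ _ _ _ (fun q hq => by have := hpwh q hq; omega)
      obtain ⟨hL, hW1, hP1, hEq⟩ := step_aligned weight w (e + (bl : Int) - 1) ws bl hbl
        ((e, v) :: rest) rest (sumV ((e, v) :: rest) - v) hwin2 hpw hE
      rw [hsv] at hL
      by_cases hfit : sumV rest + w ≤ weight
      · -- the truck w enters right after (e, v) leaves, at time e + bl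
        have hpoprest : popUntilFit (bl : Int) weight w rest (sumV rest) (e + (bl : Int))
            = (rest, sumV rest, e + (bl : Int)) := by
          cases rest with
          | nil => rfl
          | cons q r =>
              obtain ⟨e', v'⟩ := q
              simp only [popUntilFit]
              rw [if_neg (by omega)]
        have hpop : popUntilFit (bl : Int) weight w ((e, v) :: rest)
            (sumV ((e, v) :: rest)) τ = (rest, sumV rest, e + (bl : Int)) := by
          simp only [popUntilFit]
          rw [if_pos (by omega), hsv, hpoprest]
        refine ⟨rest, e + (bl : Int), k + 1, hpop, by omega, by omega, by omega,
          fun q hq => ⟨by have := hpwh q hq; omega, (hwin q (by simp [hq])).2⟩,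
          hpw.of_cons, fun f => ?_⟩
        have hstep := hEq (f)
        rw [if_pos hfit] at hstep
        rw [show k + 1 + f = k + (1 + f) from by omega]
        rw [hzr (1 + f)
          (by
            intro s hs1 hs2
            apply lookup_eq_zero
            intro q hq
            rcases List.mem_cons.mp hq with h | h
            · subst h; exact (by omega : e ≠ s)
            · have := hpwh q h; exact (by omega : q.1 ≠ s))
          (by
            intro s hs
            apply lookup_eq_zero
            intro q hq
            have h2 := (hwin q hq).2
            omega)]
        rw [show τ - (bl : Int) + 1 + (k : Int) = (e + (bl : Int) - 1) - (bl : Int) + 1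
            from by omega,
          show τ + (k : Int) = e + (bl : Int) - 1 from by omega]
        rw [hstep]
        rw [show e + (bl : Int) - 1 + 1 = e + (bl : Int) from by ring]
      · -- still too heavy: recurse on the remaining trucks
        obtain ⟨on', t', c', hpop', hlt', hub', hcI', hwin'', hpw'', hEq'⟩ :=
          ih (e + (bl : Int)) U
            (fun q hq => ⟨by have := hpwh q hq; omega, (hwin q (by simp [hq])).2⟩)
            hpw.of_cons (by omega) (by omega)
        have hpop : popUntilFit (bl : Int) weight w ((e, v) :: rest)
            (sumV ((e, v) :: rest)) τ = (on', sumV on', t') := by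
          simp only [popUntilFit]
          rw [if_pos (by omega), hsv, hpop']
        refine ⟨on', t', k + 1 + c', hpop, by omega, hub', by omega,
          fun q hq => ⟨(hwin'' q hq).1, (hwin'' q hq).2⟩, hpw'', fun f => ?_⟩
        have hstep := hEq (c' + f)
        rw [if_neg hfit] at hstep
        rw [show k + 1 + c' + f = k + (1 + (c' + f)) from by omega]
        rw [hzr (1 + (c' + f))
          (by
            intro s hs1 hs2
            apply lookup_eq_zero
            intro q hq
            rcases List.mem_cons.mp hq with h | h
            · subst h; exact (by omega : e ≠ s)
            · have := hpwh q h; exact (by omega : q.1 ≠ s))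
          (by
            intro s hs
            apply lookup_eq_zero
            intro q hq
            have h2 := (hwin q hq).2
            omega)]
        rw [show τ - (bl : Int) + 1 + (k : Int) = (e + (bl : Int) - 1) - (bl : Int) + 1
            from by omega,
          show τ + (k : Int) = e + (bl : Int) - 1 from by omega]
        rw [hstep]
        rw [show e + (bl : Int) - 1 + 1 = e + (bl : Int) from by ring]
        exact hEq' f

theorem main_loop (weight : Int) (bl : Nat) (hbl : 1 ≤ bl) :
    ∀ (ws : List Int) (on : List (Int × Int)) (t : Int) (fuel : Nat),
      (∀ x ∈ ws, x ≤ weight) →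
      (∀ p ∈ on, t - (bl : Int) < p.1 ∧ p.1 ≤ t) → List.Pairwise keyLT on →
      (ws.length + 1) * bl ≤ fuel →
      aLoop weight fuel (cells on (t - (bl : Int) + 1) bl) (sumV on) ws t
        = bLoop (bl : Int) weight ws on (sumV on) t := by
  intro ws
  induction ws with
  | nil =>
      intro on t fuel _ _ _ hf
      rw [aLoop_drain weight _ fuel _ _ (by rw [cells_len]; simpa using hf), cells_len]
      simp [bLoop]
  | cons w ws ih =>
      intro on t fuel hall hwin hpw hf
      have hwt : w ≤ weight := hall w (by simp)
      have hall' : ∀ x ∈ ws, x ≤ weight := fun x hx => hall x (by simp [hx])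
      rcases hE : dropExited (bl : Int) (t + 1) on (sumV on) with ⟨on₁, load₁⟩
      obtain ⟨hL, hW1, hP1, hEq⟩ := step_aligned weight w t ws bl hbl on on₁ load₁ hwin hpw hE
      simp only [List.length_cons] at hf
      by_cases hfit : sumV on₁ + w ≤ weight
      · -- the truck enters at time t + 1
        obtain ⟨f, hfuel, hfge⟩ : ∃ f, fuel = 1 + f ∧ (ws.length + 1) * bl ≤ f :=
          ⟨fuel - 1, by
            have : (ws.length + 1 + 1) * bl = (ws.length + 1) * bl + bl := by ring
            omega, by
            have : (ws.length + 1 + 1) * bl = (ws.length + 1) * bl + bl := by ring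
            omega⟩
        have hnot : ¬ (load₁ + w > weight) := by omega
        have hq : popUntilFit (bl : Int) weight w on₁ load₁ (t + 1) = (on₁, load₁, t + 1) := by
          cases on₁ with
          | nil => rfl
          | cons q r =>
              obtain ⟨e', v'⟩ := q
              simp only [popUntilFit]
              rw [if_neg hnot]
        have hB : bLoop (bl : Int) weight (w :: ws) on (sumV on) t
            = bLoop (bl : Int) weight ws (on₁ ++ [(t + 1, w)]) (load₁ + w) (t + 1) := by
          simp only [bLoop, hE, hq]
        rw [hB, hfuel, hEq f, if_pos hfit, hL]
        have hwin' : ∀ p ∈ on₁ ++ [(t + 1, w)],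
            t + 1 - (bl : Int) < p.1 ∧ p.1 ≤ t + 1 := by
          intro q hq'
          rcases List.mem_append.mp hq' with h | h
          · have := hW1 q h; constructor <;> omega
          · simp at h; subst h; exact ⟨by simp; omega, by simp⟩
        have hpw' : List.Pairwise keyLT (on₁ ++ [(t + 1, w)]) := by
          rw [List.pairwise_append]
          refine ⟨hP1, List.pairwise_singleton _ _, ?_⟩
          intro a ha b hb
          simp at hb
          have := (hW1 a ha).2
          subst hb
          show a.1 < t + 1
          omega
        have := ih (on₁ ++ [(t + 1, w)]) (t + 1) f hall' hwin' hpw' hfge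
        rw [sumV_snoc] at this
        exact this
      · -- the truck must wait: pop phase
        obtain ⟨on', t', c, hpop, hlt, hub, hcI, hwin', hpw', hEq'⟩ :=
          pop_run weight w bl hbl hwt ws on₁ (t + 1) t
            (fun p hp => hW1 p hp) hP1 (by omega) (by omega)
        have hcle : c ≤ bl - 1 := by omega
        obtain ⟨f, hfuel, hfge⟩ : ∃ f, fuel = 1 + (c + f) ∧ (ws.length + 1) * bl ≤ f :=
          ⟨fuel - 1 - c, by
            have : (ws.length + 1 + 1) * bl = (ws.length + 1) * bl + bl := by ring
            omega, by
            have : (ws.length + 1 + 1) * bl = (ws.length + 1) * bl + bl := by ring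
            omega⟩
        have hB : bLoop (bl : Int) weight (w :: ws) on (sumV on) t
            = bLoop (bl : Int) weight ws (on' ++ [(t', w)]) (sumV on' + w) t' := by
          simp only [bLoop, hE, hL, hpop]
        rw [hB, hfuel, hEq (c + f), if_neg hfit, hEq' f]
        have hwin'' : ∀ p ∈ on' ++ [(t', w)],
            t' - (bl : Int) < p.1 ∧ p.1 ≤ t' := by
          intro q hq'
          rcases List.mem_append.mp hq' with h | h
          · have := hwin' q h; constructor <;> omega
          · simp at h; subst h; exact ⟨by simp; omega, by simp⟩
        have hpw'' : List.Pairwise keyLT (on' ++ [(t', w)]) := by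
          rw [List.pairwise_append]
          refine ⟨hpw', List.pairwise_singleton _ _, ?_⟩
          intro a ha b hb
          simp at hb
          have := (hwin' a ha).2
          subst hb
          show a.1 < t'
          omega
        have := ih (on' ++ [(t', w)]) t' f hall' hwin'' hpw'' hfge
        rw [sumV_snoc] at this
        exact this

-- ===== VERDICT (by name: the statement is the Claim_ definition above) =====
theorem aLoop_empty (weight cur cnt : Int) (ws : List Int) (fuel : Nat) :
    aLoop weight fuel [] cur ws cnt = cnt := by
  cases fuel <;> simp [aLoop]

theorem solution_spec : Claim_equal_solution := by
  intro bl weight tw _ hpre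
  unfold Spec_solution solution solution_alt
  by_cases hbl : bl ≤ 0
  · rw [if_pos hbl, show bl.toNat = 0 from by omega, List.replicate_zero, aLoop_empty]
  · rw [if_neg hbl]
    have hall : ∀ x ∈ tw, x ≤ weight := hpre.resolve_left hbl
    obtain ⟨n, hn⟩ : ∃ n : Nat, (n : Int) = bl := ⟨bl.toNat, by omega⟩
    have hn1 : 1 ≤ n := by omega
    have htn : bl.toNat = n := by omega
    rw [htn, ← hn]
    have h0 : List.replicate n (0 : Int) = cells [] ((0 : Int) - (n : Int) + 1) n :=
      (cells_nil _ _).symm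
    rw [h0]
    have := main_loop weight n hn1 tw [] 0 ((tw.length + 1) * n) hall (by simp) (by simp)
      (le_refl _)
    simpa [sumV] using this
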